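-- pv_equiv track=rewrite | github.com/amanchourasiya/leetcode | t.py | findCool
-- ===== SOURCE A (Python) =====
-- def findCool(n):
--     s = bin(n)[2:]
--     res = 0
--     index = 0
--     while index < len(s)-2:
--         index = s.find('101', index, len(s))
--         if index == -1:
--             break
--         res+=1
--         index+=1
--
--     return res
-- ===== SOURCE B (Python) =====
-- def findCool(n):
--     # Count occurrences of the bit pattern 101 by scanning the integer's bits
--     # directly (no binary-string construction, no substring search).
--     m = abs(n)
--     res = 0
--     while m:
--         if m & 7 == 5:
--             res += 1
--         m >>= 1
--     return res
-- ===== Notes on version B (the rewrite author's own statement) =====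
-- stated objective: alternative
-- what changed: B replaces building the binary string and repeatedly calling str.find with a direct bit scan of abs(n): shift right once per bit and count the windows whose low three bits form the pattern (valid because the pattern is a palindrome, so LSB-first scanning counts the same occurrences).
import Mathlib
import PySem

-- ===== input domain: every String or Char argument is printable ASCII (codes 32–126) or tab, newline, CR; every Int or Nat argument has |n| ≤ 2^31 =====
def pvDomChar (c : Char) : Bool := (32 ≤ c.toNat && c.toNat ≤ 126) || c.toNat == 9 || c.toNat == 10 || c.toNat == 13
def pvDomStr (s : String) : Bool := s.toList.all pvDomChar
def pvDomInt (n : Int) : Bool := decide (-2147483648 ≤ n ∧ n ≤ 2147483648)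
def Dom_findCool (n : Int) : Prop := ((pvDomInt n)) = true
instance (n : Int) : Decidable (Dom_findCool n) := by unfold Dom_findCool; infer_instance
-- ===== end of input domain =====

-- B counts '101' bit-windows by shifting abs(n) right, instead of building the
-- binary string and repeatedly calling str.find as A does.

-- ===== PORT A =====
-- the while loop: index = s.find('101', index, len(s)).  Fuel s.length + 1 is
-- enough because index strictly increases each iteration (proved in aloopA_occ).
def aloopA (s : List Char) : Nat → Int → Int → Int
  | 0, _, res => res
  | fuel+1, index, res =>
    if index < (s.length : Int) - 2 then
      let i := PySem.Chars.findFrom s ['1','0','1'] index (some (s.length : Int))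
      if i = -1 then res
      else aloopA s fuel (i+1) (res+1)
    else res


def findCool (n : Int) : Int :=
  let s := PySem.List.slice (PySem.Int.pyBin n).toList (some 2) none   -- bin(n)[2:]
  aloopA s (s.length + 1) 0 0

-- ===== PORT B =====
-- while m: if m & 7 == 5: res += 1; m >>= 1
def bgo (m : Nat) (res : Int) : Int :=
  if h : m = 0 then res
  else bgo (m / 2) (if m &&& 7 = 5 then res + 1 else res)
  termination_by m
  decreasing_by exact Nat.div_lt_self (Nat.pos_of_ne_zero h) (by norm_num)


def findCool_alt (n : Int) : Int := bgo n.natAbs 0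

-- ===== PRECONDITION & SPEC =====
def Spec_findCool (n : Int) (out : Int) : Prop := out = findCool_alt n
instance (n : Int) (out : Int) : Decidable (Spec_findCool n out) := by unfold Spec_findCool; infer_instance

-- ===== CLAIM (what is proved, stated in full; the proofs are below) =====
def Claim_equal_findCool : Prop := ∀ (n : Int), Dom_findCool n → Spec_findCool n (findCool n)

-- ===== LEMMAS AND PROOFS =====

lemma tdc_acc (n : Nat) : ∀ (f : Nat) (acc : List Char), n < f →
    Nat.toDigitsCore 2 f n acc = Nat.toDigitsCore 2 f n [] ++ acc := by
  induction n using Nat.strong_induction_on with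
  | _ n ih =>
    intro f acc h
    match f, h with
    | f+1, _ =>
      simp only [Nat.toDigitsCore]
      by_cases h2 : n / 2 = 0
      · simp [h2]
      · simp only [h2, ite_false]
        rw [ih (n/2) (by omega) f _ (by omega), ih (n/2) (by omega) f [_] (by omega)]
        simp
lemma tdc_fuel (n : Nat) : ∀ (f f' : Nat), n < f → n < f' →
    Nat.toDigitsCore 2 f n [] = Nat.toDigitsCore 2 f' n [] := by
  induction n using Nat.strong_induction_on with
  | _ n ih =>
    intro f f' h h'
    match f, h, f', h' with
    | f+1, _, f'+1, _ =>
      simp only [Nat.toDigitsCore]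
      by_cases h2 : n / 2 = 0
      · simp [h2]
      · simp only [h2, ite_false]
        rw [tdc_acc (n/2) f _ (by omega), tdc_acc (n/2) f' _ (by omega),
            ih (n/2) (by omega) f f' (by omega) (by omega)]
lemma toDigits_two_step (m : Nat) (h : 2 ≤ m) :
    Nat.toDigits 2 m = Nat.toDigits 2 (m / 2) ++ [Nat.digitChar (m % 2)] := by
  rw [Nat.toDigits, Nat.toDigits]
  conv_lhs => simp only [Nat.toDigitsCore]
  have h2 : ¬ m / 2 = 0 := by omega
  simp only [h2, ite_false]
  rw [tdc_acc (m/2) m _ (by omega), tdc_fuel (m/2) m (m/2+1) (by omega) (by omega)]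
lemma toDigits_ne_nil (m : Nat) : Nat.toDigits 2 m ≠ [] := by
  rcases Nat.lt_or_ge m 2 with h | h
  · interval_cases m <;> decide
  · rw [toDigits_two_step m h]; simp
lemma toDigits_getLast (m : Nat) :
    (Nat.toDigits 2 m).getLast? = some (Nat.digitChar (m % 2)) := by
  rcases Nat.lt_or_ge m 2 with h | h
  · interval_cases m <;> decide
  · rw [toDigits_two_step m h]; simp
def occ (s : List Char) : Nat :=
  (List.range s.length).countP (fun j => decide ((s.drop j).take 3 = ['1', '0', '1']))
lemma pat_at_iff (t : List Char) (j : Nat) :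
    (t.drop j).take 3 = ['1','0','1'] ↔ ['1','0','1'] <+: t.drop j := by
  rw [List.prefix_iff_eq_take]
  constructor <;> (intro h; simpa using h.symm)
lemma occ_none (t : List Char) (h : PySem.Chars.find t ['1','0','1'] = -1) : occ t = 0 := by
  rw [PySem.Chars.find_eq_neg_one_iff] at h
  rw [occ, List.countP_eq_zero]
  intro j _
  simp only [decide_eq_true_eq]
  intro hEq
  exact h (((pat_at_iff t j).1 hEq).isInfix.trans (List.drop_suffix j t).isInfix)
lemma occ_pos_first (t : List Char) (h : 0 ≤ PySem.Chars.find t ['1','0','1']) :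
    occ t = occ (t.drop ((PySem.Chars.find t ['1','0','1']).toNat + 1)) + 1 := by
  obtain ⟨hpre, hmin⟩ := PySem.Chars.find_spec h
  set f := (PySem.Chars.find t ['1','0','1']).toNat with hf
  have hlen : f + 3 ≤ t.length := by
    have h1 := hpre.length_le
    simp only [List.length_drop, List.length_cons, List.length_nil] at h1
    have h2 := PySem.Chars.find_le_length t ['1','0','1']
    omega
  rw [occ]
  have hsplit : t.length = (f + 1) + (t.length - (f+1)) := by omega
  rw [hsplit, List.range_add, List.countP_append, List.range_succ, List.countP_append]
  have c1 : (List.range f).countP (fun j => decide ((t.drop j).take 3 = ['1','0','1'])) = 0 := by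
    rw [List.countP_eq_zero]
    intro j hj
    simp only [List.mem_range] at hj
    simp only [decide_eq_true_eq]
    exact fun hEq => hmin j hj ((pat_at_iff t j).1 hEq)
  have c2 : ([f]).countP (fun j => decide ((t.drop j).take 3 = ['1','0','1'])) = 1 := by
    simp [(pat_at_iff t f).2 hpre]
  have c3 : ((List.range (t.length - (f+1))).map ((f+1) + ·)).countP
      (fun j => decide ((t.drop j).take 3 = ['1','0','1'])) = occ (t.drop (f+1)) := by
    rw [List.countP_map, occ]
    simp only [List.length_drop]
    apply List.countP_congr
    intro j _
    simp only [Function.comp_apply, List.drop_drop]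
  omega
lemma occ_short (s : List Char) (h : s.length < 3) : occ s = 0 := by
  rw [occ, List.countP_eq_zero]
  intro j hj
  simp only [List.mem_range] at hj
  simp only [decide_eq_true_eq]
  intro hEq
  have := congrArg List.length hEq
  simp only [List.length_take, List.length_drop, List.length_cons, List.length_nil] at this
  omega
lemma len_ne_pat (u : List Char) (h : u.length ≠ 3) : u ≠ ['1','0','1'] := by
  intro hEq; rw [hEq] at h; simp at h
lemma occ_append_singleton (s : List Char) (c : Char) :
    occ (s ++ [c]) = occ s +
      (if 2 ≤ s.length ∧ s.drop (s.length - 2) ++ [c] = ['1','0','1'] then 1 else 0) := by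
  rcases Nat.lt_or_ge s.length 2 with hlen | hlen
  · rw [occ_short s (by omega), occ_short (s ++ [c]) (by simp; omega)]
    simp [hlen]
  · rw [occ, occ]
    have h1 : (s ++ [c]).length = (s.length - 2) + 3 := by simp; omega
    have h2 : s.length = (s.length - 2) + 2 := by omega
    rw [h1, List.range_add, List.countP_append]
    conv_rhs => rw [h2, List.range_add, List.countP_append]
    have hA : (List.range (s.length - 2)).countP
        (fun j => decide (((s ++ [c]).drop j).take 3 = ['1','0','1'])) =
        (List.range (s.length - 2)).countP
        (fun j => decide ((s.drop j).take 3 = ['1','0','1'])) := by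
      apply List.countP_congr
      intro j hj
      simp only [List.mem_range] at hj
      rw [List.drop_append_of_le_length (by omega), List.take_append_of_le_length
        (by simp only [List.length_drop]; omega)]
    rw [hA]
    have e3 : List.range 3 = [0,1,2] := by decide
    have e2 : List.range 2 = [0,1] := by decide
    rw [e3, e2]
    simp only [List.map_cons, List.map_nil, List.countP_cons, List.countP_nil]
    have p0 : ¬ ((s.drop (s.length - 2 + 0)).take 3 = ['1','0','1']) := by
      apply len_ne_pat
      simp only [List.length_take, List.length_drop]; omega
    have p1 : ¬ ((s.drop (s.length - 2 + 1)).take 3 = ['1','0','1']) := by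
      apply len_ne_pat
      simp only [List.length_take, List.length_drop]; omega
    have q1 : ¬ (((s ++ [c]).drop (s.length - 2 + 1)).take 3 = ['1','0','1']) := by
      apply len_ne_pat
      simp only [List.length_take, List.length_drop, List.length_append, List.length_cons,
        List.length_nil]; omega
    have q2 : ¬ (((s ++ [c]).drop (s.length - 2 + 2)).take 3 = ['1','0','1']) := by
      apply len_ne_pat
      simp only [List.length_take, List.length_drop, List.length_append, List.length_cons,
        List.length_nil]; omega
    have q0 : ((s ++ [c]).drop (s.length - 2 + 0)).take 3 = s.drop (s.length - 2) ++ [c] := by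
      rw [Nat.add_zero, List.drop_append_of_le_length (by omega)]
      apply List.take_of_length_le
      simp only [List.length_append, List.length_drop, List.length_cons, List.length_nil]; omega
    rw [q0]
    simp only [p1, q1, q2, decide_false, Bool.false_eq_true, if_false, Nat.add_zero]
    by_cases hc : s.drop (s.length - 2) ++ [c] = ['1','0','1'] <;> simp [hc] <;> omega
lemma digit3_iff (a b c : Nat) (ha : a < 2) (hb : b < 2) (hc : c < 2) :
    ([Nat.digitChar a, Nat.digitChar b] ++ [Nat.digitChar c] = ['1','0','1']) ↔
      (a = 1 ∧ b = 0 ∧ c = 1) := by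
  interval_cases a <;> interval_cases b <;> interval_cases c <;> decide
lemma occ_digits_step (m : Nat) (h : 2 ≤ m) :
    occ (Nat.toDigits 2 m) = occ (Nat.toDigits 2 (m / 2)) + (if m % 8 = 5 then 1 else 0) := by
  rw [toDigits_two_step m h, occ_append_singleton]
  congr 1
  apply if_congr _ rfl rfl
  rcases Nat.lt_or_ge m 4 with h4 | h4
  · have hm : m / 2 = 1 := by omega
    rw [hm]
    have e1 : Nat.toDigits 2 1 = ['1'] := by decide
    have h5 : m % 8 ≠ 5 := by omega
    rw [e1]
    simp [h5]
  · have hdd : m / 2 / 2 = m / 4 := by omega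
    have hstep := toDigits_two_step (m / 2) (by omega)
    rw [hdd] at hstep
    rw [hstep]
    have hne := toDigits_ne_nil (m / 4)
    have hlast : (Nat.toDigits 2 (m / 4)).getLast hne = Nat.digitChar (m / 4 % 2) := by
      have := toDigits_getLast (m / 4)
      rw [List.getLast?_eq_some_getLast hne] at this
      exact Option.some.inj this
    have hlen1 : 1 ≤ (Nat.toDigits 2 (m / 4)).length := List.length_pos_of_ne_nil hne
    have hdrop : (Nat.toDigits 2 (m / 4) ++ [Nat.digitChar (m / 2 % 2)]).drop
        ((Nat.toDigits 2 (m / 4) ++ [Nat.digitChar (m / 2 % 2)]).length - 2) =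
        [Nat.digitChar (m / 4 % 2), Nat.digitChar (m / 2 % 2)] := by
      rw [List.length_append]
      simp only [List.length_cons, List.length_nil]
      rw [List.drop_append_of_le_length (by omega)]
      have : (Nat.toDigits 2 (m / 4)).length + 1 - 2 = (Nat.toDigits 2 (m / 4)).length - 1 := by
        omega
      rw [this, List.drop_length_sub_one hne, hlast]
      simp
    rw [hdrop]
    have hlen2 : 2 ≤ (Nat.toDigits 2 (m / 4) ++ [Nat.digitChar (m / 2 % 2)]).length := by
      simp only [List.length_append, List.length_cons, List.length_nil]; omega
    simp only [hlen2, true_and]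
    rw [digit3_iff (m/4 % 2) (m/2 % 2) (m % 2) (Nat.mod_lt _ (by norm_num))
      (Nat.mod_lt _ (by norm_num)) (Nat.mod_lt _ (by norm_num))]
    omega
lemma and_seven (m : Nat) : m &&& 7 = m % 8 := by
  have := Nat.and_two_pow_sub_one_eq_mod m 3
  norm_num at this; omega

lemma bgo_occ (m : Nat) : ∀ res : Int, bgo m res = res + (occ (Nat.toDigits 2 m) : Int) := by
  induction m using Nat.strong_induction_on with
  | _ m ih =>
    intro res
    rcases Nat.lt_or_ge m 2 with h2 | h2
    · interval_cases m
      · rw [bgo]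
        have h0 : (occ (Nat.toDigits 2 0) : Int) = 0 := by decide
        rw [h0]
        simp
      · rw [bgo, bgo]
        have : occ (Nat.toDigits 2 1) = 0 := by decide
        norm_num [this]
    · rw [bgo]
      have hm : ¬ m = 0 := by omega
      rw [dif_neg hm, ih (m / 2) (by omega), occ_digits_step m h2, and_seven]
      push_cast
      by_cases h5 : m % 8 = 5
      · simp [h5]; ring
      · simp [h5]

lemma findFrom_end_len (s sub : List Char) (k : Int) :
    PySem.Chars.findFrom s sub k (some (s.length : Int)) = PySem.Chars.findFrom s sub k none := by
  have h2 : ¬ ((s.length : Int) < 0) := by omega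
  simp [PySem.Chars.findFrom, lt_self_iff_false, h2]

lemma aloopA_occ (fuel : Nat) : ∀ (s : List Char) (i : Nat) (res : Int),
    s.length - i ≤ fuel → aloopA s fuel (i : Int) res = res + (occ (s.drop i) : Int) := by
  induction fuel with
  | zero =>
    intro s i res h
    rw [aloopA]
    have : s.drop i = [] := List.drop_eq_nil_of_le (by omega)
    rw [this]
    have : occ ([] : List Char) = 0 := by decide
    simp [this]
  | succ fuel ih =>
    intro s i res h
    rw [aloopA]
    by_cases hc : (i : Int) < (s.length : Int) - 2
    · rw [if_pos hc]
      simp only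
      rw [findFrom_end_len, PySem.Chars.findFrom_natCast s ['1','0','1'] i (by omega)]
      by_cases hf : PySem.Chars.find (s.drop i) ['1','0','1'] = -1
      · rw [if_pos hf]
        rw [occ_none (s.drop i) hf]
        simp
      · rw [if_neg hf]
        have hF : 0 ≤ PySem.Chars.find (s.drop i) ['1','0','1'] := by
          have := PySem.Chars.neg_one_le_find (s.drop i) ['1','0','1']
          omega
        set F := PySem.Chars.find (s.drop i) ['1','0','1'] with hFdef
        have hne : ¬ ((i : Int) + F = -1) := by omega
        rw [if_neg hne]
        have hcast : (i : Int) + F + 1 = ((i + F.toNat + 1 : Nat) : Int) := by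
          push_cast [Int.toNat_of_nonneg hF]
          ring
        rw [hcast, ih s (i + F.toNat + 1) (res + 1) (by omega)]
        have hocc := occ_pos_first (s.drop i) hF
        rw [← hFdef] at hocc
        rw [List.drop_drop] at hocc
        have hidx : i + (F.toNat + 1) = i + F.toNat + 1 := by omega
        rw [hidx] at hocc
        rw [hocc]
        push_cast
        ring
    · rw [if_neg hc]
      have : occ (s.drop i) = 0 := by
        apply occ_short
        simp only [List.length_drop]
        omega
      simp [this]

lemma occ_cons_b (t : List Char) : occ ('b' :: t) = occ t := by
  rw [occ, occ]
  simp only [List.length_cons, List.range_succ_eq_map, List.countP_cons, List.countP_map]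
  have h0 : ¬ (('b' :: t).take 3 = ['1','0','1']) := by
    cases t with
    | nil => decide
    | cons a t' => cases t' <;> simp [List.take]
  simp only [List.drop_zero, h0, decide_false, Bool.false_eq_true, if_false, Nat.add_zero]
  apply List.countP_congr
  intro j _
  simp [Function.comp, List.drop_succ_cons]

lemma aloopA_top (s : List Char) : aloopA s (s.length + 1) 0 0 = (occ s : Int) := by
  have h := aloopA_occ (s.length + 1) s 0 0 (by omega)
  simpa using h

-- ===== VERDICT (by name: the statement is the Claim_ definition above) =====
theorem findCool_spec : Claim_equal_findCool := by
  intro n _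
  unfold Spec_findCool findCool findCool_alt
  rw [bgo_occ]
  have hslice : ∀ (l : List Char), PySem.List.slice l (some 2) none = l.drop 2 := by
    intro l
    have := PySem.List.slice_from_natCast l 2
    simpa using this
  simp only [hslice, PySem.Int.toList_pyBin, PySem.Int.toBinChars0b]
  by_cases hn : n < 0
  · rw [if_pos hn]
    simp only [List.drop_succ_cons, List.drop_zero]
    rw [aloopA_top, occ_cons_b]
    simp
  · rw [if_neg hn]
    simp only [List.drop_succ_cons, List.drop_zero]
    rw [aloopA_top]
    rw [show n.toNat = n.natAbs by omega]
    simp
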